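-- pv_equiv track=rewrite | github.com/cazcaz/Project-Euler-Solutions | Q32.py | pandigital_test
-- ===== SOURCE A (Python) =====
-- import collections
--
-- def pandigital_test(a,b):
--     product = a*b
--     lsta = [int(char) for char in str(a)]
--     lstb = [int(char) for char in str(b)]
--     lstproduct = [int(char) for char in str(product)]
--     lst=[]
--     lst += lsta
--     lst += lstb
--     lst += lstproduct
--     frequency = list(collections.Counter(lst).values())
--     values = set(collections.Counter(lst).keys())
--     compareones = [1,1,1,1,1,1,1,1,1]
--     comparevalues = set([1,2,3,4,5,6,7,8,9])
--     if frequency == compareones and values == comparevalues: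
--         return True
--     else:
--         return False
-- ===== SOURCE B (Python) =====
-- def pandigital_test(a, b):
--     digits = [int(c) for c in str(a) + str(b) + str(a * b)]
--     return sorted(digits) == [1, 2, 3, 4, 5, 6, 7, 8, 9]
-- ===== Notes on version B (the rewrite author's own statement) =====
-- stated objective: simpler
-- what changed: Replaces the two Counter traversals (frequency list compared to nine 1s plus a key-set comparison) with one sort of the concatenated digit list compared directly to [1..9] - a sort-then-compare multiset check instead of a frequency table.
import Mathlib
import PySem

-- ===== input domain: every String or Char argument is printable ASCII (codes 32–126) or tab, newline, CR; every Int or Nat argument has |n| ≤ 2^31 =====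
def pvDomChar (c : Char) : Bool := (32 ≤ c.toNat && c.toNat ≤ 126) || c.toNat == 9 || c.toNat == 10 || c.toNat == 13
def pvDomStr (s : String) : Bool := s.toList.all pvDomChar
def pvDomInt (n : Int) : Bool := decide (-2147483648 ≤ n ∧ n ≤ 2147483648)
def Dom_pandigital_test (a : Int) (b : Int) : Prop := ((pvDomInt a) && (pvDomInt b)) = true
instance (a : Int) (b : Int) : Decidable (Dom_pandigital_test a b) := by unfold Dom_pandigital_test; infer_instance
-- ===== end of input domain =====

-- B replaces A's Counter frequency-table check with a sort-then-compare multiset check (objective: simpler).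

-- shared digit extraction: [int(char) for char in str(n)] — both Pythons contain this
-- subexpression literally; PySem.Int.ofChars? [c] = none is exactly Python's ValueError
-- on the '-' character, which Pre_pandigital_test excludes (a < 0 or b < 0), so the
-- .getD 0 default is never reached on admitted inputs.
def pyDigits (n : Int) : List Int :=
  (PySem.Int.toChars n).map (fun c => (PySem.Int.ofChars? [c]).getD 0)

-- ===== PORT A =====
def pandigital_test (a : Int) (b : Int) : Bool :=
  let product := a * b
  let lsta := pyDigits a
  let lstb := pyDigits b
  let lstproduct := pyDigits product
  let lst : List Int := ([] : List Int) ++ lsta ++ lstb ++ lstproduct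
  let frequency := (PySem.Dict.counter lst).values
  let values : PySem.Set Int := PySem.Set.ofList (PySem.Dict.counter lst).keys
  let compareones : List Int := [1, 1, 1, 1, 1, 1, 1, 1, 1]
  let comparevalues : PySem.Set Int := PySem.Set.ofList [1, 2, 3, 4, 5, 6, 7, 8, 9]
  if frequency == compareones && PySem.Set.equal values comparevalues then true else false

-- ===== PORT B =====
def pandigital_test_alt (a : Int) (b : Int) : Bool :=
  let digits : List Int := pyDigits a ++ pyDigits b ++ pyDigits (a * b)
  PySem.List.sorted digits id == [1, 2, 3, 4, 5, 6, 7, 8, 9]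

-- ===== PRECONDITION & SPEC =====
-- Pre_ excludes a < 0 or b < 0: there str(·) contains '-' and int('-') raises ValueError in A (and in B).
def Pre_pandigital_test (a : Int) (b : Int) : Prop := 0 ≤ a ∧ 0 ≤ b
instance (a : Int) (b : Int) : Decidable (Pre_pandigital_test a b) := by
  unfold Pre_pandigital_test; infer_instance
def pvWitness_pandigital_test : Int × Int := (39, 186)

def Spec_pandigital_test (a : Int) (b : Int) (out : Bool) : Prop := out = pandigital_test_alt a b
instance (a : Int) (b : Int) (out : Bool) : Decidable (Spec_pandigital_test a b out) := by
  unfold Spec_pandigital_test; infer_instance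

-- ===== CLAIM (what is proved, stated in full; the proofs are below) =====
def Claim_equal_pandigital_test : Prop := ∀ (a : Int) (b : Int), Dom_pandigital_test a b → Pre_pandigital_test a b → Spec_pandigital_test a b (pandigital_test a b)


-- ===== LEMMAS AND PROOFS =====

-- The heart of the equivalence, for an ARBITRARY digit list l:
-- "every Counter frequency is 1 and the key set is {1..9}"  =  "sorted l = [1..9]".

theorem counter_check_eq_sorted_check (l : List Int) :
    (((PySem.Dict.counter l).values == [1, 1, 1, 1, 1, 1, 1, 1, 1]) &&
      PySem.Set.equal (PySem.Set.ofList (PySem.Dict.counter l).keys)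
        (PySem.Set.ofList [1, 2, 3, 4, 5, 6, 7, 8, 9]))
      = (PySem.List.sorted l id == [1, 2, 3, 4, 5, 6, 7, 8, 9]) := by
  have hkeys : (PySem.Dict.counter l).keys = PySem.Set.ofList l := PySem.Dict.keys_counter l
  have hvals : (PySem.Dict.counter l).values
      = (PySem.Set.ofList l).map (fun k => ((l.count k : Nat) : Int)) := by
    show (PySem.Dict.counter l).items.map (·.2) = _
    rw [PySem.Dict.items_counter, List.map_map]; rfl
  have hofl : PySem.Set.ofList (PySem.Dict.counter l).keys = PySem.Set.ofList l := by
    rw [hkeys, PySem.Set.ofList_eq_self_of_nodup _ (PySem.Set.nodup_ofList l)]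
  rw [Bool.eq_iff_iff]
  simp only [Bool.and_eq_true, beq_iff_eq, hvals, hofl, PySem.Set.equal_iff,
    PySem.Set.mem_ofList]
  constructor
  · rintro ⟨hones, hmem⟩
    -- every count is 1, so l is nodup
    have hcnt : ∀ k ∈ l, l.count k = 1 := by
      intro k hk
      have : ((l.count k : Nat) : Int) ∈ (PySem.Set.ofList l).map (fun k => ((l.count k : Nat) : Int)) :=
        List.mem_map_of_mem ((PySem.Set.mem_ofList l k).2 hk)
      rw [hones] at this
      simp at this
      omega
    have hnd : l.Nodup := List.nodup_iff_count_eq_one.2 hcnt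
    have hperm : l.Perm [1,2,3,4,5,6,7,8,9] :=
      (List.perm_ext_iff_of_nodup hnd (by decide)).2 (by simpa using hmem)
    exact PySem.List.sorted_eq_of_perm_of_pairwise_lt l [1,2,3,4,5,6,7,8,9] id
      hperm.symm (by decide)
  · intro hs
    have hperm : l.Perm [1,2,3,4,5,6,7,8,9] := (hs ▸ PySem.List.sorted_perm l id false).symm
    have hnd : l.Nodup := hperm.nodup_iff.2 (by decide)
    have hul : PySem.Set.ofList l = l := PySem.Set.ofList_eq_self_of_nodup l hnd
    refine ⟨?_, fun x => (hperm.mem_iff).trans (by simp)⟩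
    rw [hul]
    have hlen : l.length = 9 := by simpa using hperm.length_eq
    have : l.map (fun k => ((l.count k : Nat) : Int)) = List.replicate 9 1 := by
      rw [List.eq_replicate_iff]
      refine ⟨by simpa using hlen, ?_⟩
      intro b hb
      rcases List.mem_map.1 hb with ⟨k, hk, rfl⟩
      have := List.nodup_iff_count_eq_one.1 hnd k hk
      simp [this]
    simpa using this

-- ===== VERDICT (by name: the statement is the Claim_ definition above) =====
theorem pandigital_test_spec : Claim_equal_pandigital_test := by
  intro a b _ _
  unfold Spec_pandigital_test pandigital_test pandigital_test_alt
  simp only [List.nil_append]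
  rw [← counter_check_eq_sorted_check]
  simp
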